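-- pv_equiv track=rewrite | github.com/IgorBavand/CODIGOS-URI | Python/falta gravar/1308.py | qtd_filas
-- ===== SOURCE A (Python) =====
-- def somatorio(numero):
--     sum = 0
--     for l in range(1,numero+1):
--         sum = sum + l
--     return sum
--
-- def qtd_filas(qtd_guerreiros):
--     cont = 1
--     while somatorio(cont) < qtd_guerreiros:
--         cont+=1
--     if somatorio(cont) != qtd_guerreiros:
--         return cont - 1
--     else:
--         return cont
-- ===== SOURCE B (Python) =====
-- def qtd_filas(qtd_guerreiros):
--     # Binary search for the largest r with r*(r+1)//2 <= qtd_guerreiros.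
--     if qtd_guerreiros <= 0:
--         return 0
--     lo = 0
--     hi = qtd_guerreiros
--     while lo < hi:
--         mid = (lo + hi + 1) // 2
--         if mid * (mid + 1) // 2 <= qtd_guerreiros:
--             lo = mid
--         else:
--             hi = mid - 1
--     return lo
-- ===== Notes on version B (the rewrite author's own statement) =====
-- stated objective: faster
-- what changed: Replaces the linear scan that recomputes the triangular sum with a loop each step by a binary search on the closed-form formula r*(r+1)//2 for the largest row count that fits.
import Mathlib
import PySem

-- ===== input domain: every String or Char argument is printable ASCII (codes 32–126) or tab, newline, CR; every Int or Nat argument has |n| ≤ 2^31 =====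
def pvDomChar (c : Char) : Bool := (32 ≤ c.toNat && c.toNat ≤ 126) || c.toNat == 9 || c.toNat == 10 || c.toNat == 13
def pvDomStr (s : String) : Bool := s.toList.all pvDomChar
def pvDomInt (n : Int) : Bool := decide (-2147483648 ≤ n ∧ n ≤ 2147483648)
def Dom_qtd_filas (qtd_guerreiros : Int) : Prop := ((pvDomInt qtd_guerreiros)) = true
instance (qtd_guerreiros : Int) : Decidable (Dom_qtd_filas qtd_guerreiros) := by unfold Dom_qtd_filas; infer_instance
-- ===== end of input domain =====

-- B replaces A's linear scan (which recomputes the triangular sum from scratch every step)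
-- by a binary search on the closed form r*(r+1)//2: objective = faster (asymptotic).

-- ===== PORT A =====
def somatorio (numero : Int) : Int :=
  (PySem.List.pyRange 1 (numero + 1) 1).foldl (fun s l => s + l) 0

-- lemmas needed by the port's termination proof
theorem somatorio_nonpos (n : Int) (h : n ≤ 0) : somatorio n = 0 := by
  unfold somatorio
  rw [PySem.List.pyRange_one_eq_nil (by omega)]
  rfl

theorem somatorio_succ (n : Int) (h : 0 ≤ n) : somatorio (n + 1) = somatorio n + (n + 1) := by
  unfold somatorio
  have : (n + 1 + 1 : Int) = (n + 1) + 1 := by ring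
  rw [this, PySem.List.pyRange_one_succ_right (by omega), List.foldl_append]
  simp

theorem two_somatorio (n : Int) (h : 0 ≤ n) : 2 * somatorio n = n * (n + 1) := by
  induction n, h using Int.le_induction with
  | base => simp [somatorio_nonpos 0 le_rfl]
  | succ m hm ih =>
      rw [somatorio_succ m hm, mul_add, ih]
      ring

theorem le_somatorio (n : Int) : n ≤ somatorio n := by
  by_cases h : n ≤ 0
  · rw [somatorio_nonpos n h]; exact h
  · have h2 := two_somatorio n (by omega)
    nlinarith

def qtdLoopA (q cont : Int) : Int :=
  if somatorio cont < q then qtdLoopA q (cont + 1) else cont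
termination_by (q - cont).toNat
decreasing_by
  have := le_somatorio cont
  omega

def qtd_filas (qtd_guerreiros : Int) : Int :=
  let cont := qtdLoopA qtd_guerreiros 1
  if somatorio cont ≠ qtd_guerreiros then cont - 1 else cont

-- ===== PORT B =====
def qtdLoopB (q lo hi : Int) : Int :=
  if lo < hi then
    let mid := PySem.Int.floordiv (lo + hi + 1) 2
    if PySem.Int.floordiv (mid * (mid + 1)) 2 ≤ q then qtdLoopB q mid hi
    else qtdLoopB q lo (mid - 1)
  else lo
termination_by (hi - lo).toNat
decreasing_by
  · rename_i hlt _
    have h2 : PySem.Int.floordiv (lo + hi + 1) 2 = (lo + hi + 1) / 2 :=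
      PySem.Int.floordiv_eq_ediv_of_pos (by omega)
    omega
  · rename_i hlt _
    have h2 : PySem.Int.floordiv (lo + hi + 1) 2 = (lo + hi + 1) / 2 :=
      PySem.Int.floordiv_eq_ediv_of_pos (by omega)
    omega

def qtd_filas_alt (qtd_guerreiros : Int) : Int :=
  if qtd_guerreiros ≤ 0 then 0
  else qtdLoopB qtd_guerreiros 0 qtd_guerreiros

-- ===== PRECONDITION & SPEC =====
def Spec_qtd_filas (qtd_guerreiros : Int) (out : Int) : Prop := out = qtd_filas_alt qtd_guerreiros
instance (qtd_guerreiros : Int) (out : Int) : Decidable (Spec_qtd_filas qtd_guerreiros out) := by unfold Spec_qtd_filas; infer_instance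

-- ===== CLAIM (what is proved, stated in full; the proofs are below) =====
def Claim_equal_qtd_filas : Prop := ∀ (qtd_guerreiros : Int), Dom_qtd_filas qtd_guerreiros → Spec_qtd_filas qtd_guerreiros (qtd_filas qtd_guerreiros)

-- ===== LEMMAS AND PROOFS =====

-- tri n = n*(n+1)//2, the triangular number as B computes it
def tri (n : Int) : Int := PySem.Int.floordiv (n * (n + 1)) 2

theorem two_tri (n : Int) : 2 * tri n = n * (n + 1) := by
  have hev : (2 : Int) ∣ n * (n + 1) := (Int.even_mul_succ_self n).two_dvd
  unfold tri
  rw [PySem.Int.floordiv_eq_ediv_of_pos (by omega)]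
  omega

theorem tri_succ (n : Int) : tri (n + 1) = tri n + (n + 1) := by
  have h1 := two_tri (n + 1)
  have h2 := two_tri n
  nlinarith

theorem somatorio_eq_tri (n : Int) (h : 0 ≤ n) : somatorio n = tri n := by
  have h1 := two_somatorio n h
  have h2 := two_tri n
  omega

theorem tri_mono (a b : Int) (ha : 0 ≤ a) (hab : a ≤ b) : tri a ≤ tri b := by
  have h1 := two_tri a
  have h2 := two_tri b
  nlinarith

-- P q r : r is THE answer for q ≥ 1
def AnsP (q r : Int) : Prop := 0 ≤ r ∧ tri r ≤ q ∧ q < tri (r + 1)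

theorem ansP_unique (q r s : Int) (hr : AnsP q r) (hs : AnsP q s) : r = s := by
  obtain ⟨hr0, hr1, hr2⟩ := hr
  obtain ⟨hs0, hs1, hs2⟩ := hs
  by_contra hne
  rcases lt_or_gt_of_ne hne with h | h
  · have := tri_mono (r + 1) s (by omega) (by omega); omega
  · have := tri_mono (s + 1) r (by omega) (by omega); omega

theorem loopA_spec (q cont : Int) (h1 : 1 ≤ cont) (h2 : tri (cont - 1) ≤ q) :
    1 ≤ qtdLoopA q cont ∧ tri (qtdLoopA q cont - 1) ≤ q ∧ q ≤ tri (qtdLoopA q cont) := by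
  unfold qtdLoopA
  split
  · rename_i hlt
    have : tri ((cont + 1) - 1) ≤ q := by
      have : somatorio cont = tri cont := somatorio_eq_tri cont (by omega)
      simpa [show cont + 1 - 1 = cont by ring, ← this] using le_of_lt hlt
    exact loopA_spec q (cont + 1) (by omega) this
  · rename_i hge
    have : somatorio cont = tri cont := somatorio_eq_tri cont (by omega)
    exact ⟨h1, h2, by omega⟩
termination_by (q - cont).toNat
decreasing_by
  have := le_somatorio cont
  omega

theorem loopB_spec (q lo hi : Int) (h0 : 0 ≤ lo) (h1 : lo ≤ hi)
    (h2 : tri lo ≤ q) (h3 : q < tri (hi + 1)) : AnsP q (qtdLoopB q lo hi) := by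
  unfold qtdLoopB
  dsimp only
  split
  · rename_i hlt
    have hmid : PySem.Int.floordiv (lo + hi + 1) 2 = (lo + hi + 1) / 2 :=
      PySem.Int.floordiv_eq_ediv_of_pos (by omega)
    split
    · rename_i hle
      exact loopB_spec q _ hi (by omega) (by omega) hle h3
    · rename_i hgt
      have hq' : q < tri (PySem.Int.floordiv (lo + hi + 1) 2) := lt_of_not_ge hgt
      apply loopB_spec q lo _ h0 (by omega) h2
      rw [sub_add_cancel]
      exact hq'
  · rename_i hge
    have : lo = hi := by omega
    exact ⟨h0, h2, by rw [this]; exact h3⟩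
termination_by (hi - lo).toNat
decreasing_by
  · rename_i hlt _
    omega
  · rename_i hlt _
    omega

theorem qtd_filas_ansP (q : Int) (hq : 1 ≤ q) : AnsP q (qtd_filas q) := by
  unfold qtd_filas
  have h0 : tri (1 - 1 : Int) ≤ q := by norm_num [tri, PySem.Int.floordiv]; omega
  obtain ⟨hc1, hc2, hc3⟩ := loopA_spec q 1 le_rfl h0
  set c := qtdLoopA q 1 with hc
  have hsc : somatorio c = tri c := somatorio_eq_tri c (by omega)
  by_cases h : somatorio c = q
  · simp only [h, ne_eq, not_true_eq_false, if_false]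
    refine ⟨by omega, by omega, ?_⟩
    have := tri_succ c
    omega
  · simp only [ne_eq, h, not_false_eq_true, if_true]
    refine ⟨?_, hc2, by simpa using hc3.lt_of_ne (by omega)⟩
    omega

theorem qtd_filas_alt_ansP (q : Int) (hq : 1 ≤ q) : AnsP q (qtd_filas_alt q) := by
  unfold qtd_filas_alt
  rw [if_neg (by omega)]
  apply loopB_spec q 0 q (le_rfl) (by omega)
  · norm_num [tri, PySem.Int.floordiv]; omega
  · have := two_tri (q + 1)
    nlinarith

-- ===== VERDICT (by name: the statement is the Claim_ definition above) =====
theorem qtd_filas_spec : Claim_equal_qtd_filas := by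
  intro q _
  unfold Spec_qtd_filas
  rcases le_or_gt q 0 with hq | hq
  · have h1 : somatorio 1 = 1 := by decide
    have hA1 : qtdLoopA q 1 = 1 := by
      rw [qtdLoopA, if_neg (by omega)]
    have hA : qtd_filas q
        = if somatorio (qtdLoopA q 1) ≠ q then qtdLoopA q 1 - 1 else qtdLoopA q 1 := rfl
    rw [hA, hA1, h1, if_pos (by omega)]
    unfold qtd_filas_alt
    rw [if_pos hq]
    norm_num
  · exact ansP_unique q _ _ (qtd_filas_ansP q hq) (qtd_filas_alt_ansP q hq)
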